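-- pv_equiv track=rewrite | github.com/Thiennguyen21it/leetcode_daily | 2390. Removing Stars From a String.py | removeStars2
-- ===== SOURCE A (Python) =====
-- def removeStars2(s: str) -> str:
--     """
--     Args:
--     s (str): input string containing '*' characters.
--
--     Returns:
--     str: the final string after all '*' removals.
--     """
--     result = []
--     skip = 0
--
--     # loop right to left
--     for char in reversed(s):
--         if char == '*':
--             skip +=1
--         elif skip > 0:
--             skip -=1
--         else:
--             result.append(char)
--
--     return "".join(reversed(result))
-- ===== SOURCE B (Python) =====
-- def removeStars2(s: str) -> str:
--     stack = []
--     for char in s: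
--         if char == '*':
--             if stack:
--                 stack.pop()
--         else:
--             stack.append(char)
--     return "".join(stack)
-- ===== Notes on version B (the rewrite author's own statement) =====
-- stated objective: idiomatic
-- what changed: Replaces A's right-to-left traversal with a skip counter plus a final reversal by the canonical single forward pass over s mutating a stack (push char, pop on '*'), joined with no reversal.
import Mathlib
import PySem

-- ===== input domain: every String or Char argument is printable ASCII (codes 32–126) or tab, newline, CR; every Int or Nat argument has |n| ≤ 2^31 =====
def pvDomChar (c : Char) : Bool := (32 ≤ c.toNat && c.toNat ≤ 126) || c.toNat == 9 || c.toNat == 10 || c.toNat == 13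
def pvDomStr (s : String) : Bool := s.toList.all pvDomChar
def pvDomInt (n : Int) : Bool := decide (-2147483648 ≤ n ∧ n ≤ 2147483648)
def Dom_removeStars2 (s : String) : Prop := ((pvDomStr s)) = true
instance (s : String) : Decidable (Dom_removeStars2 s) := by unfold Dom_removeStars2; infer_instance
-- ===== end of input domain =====

-- B replaces A's right-to-left skip-counter pass (plus final reversal) by the canonical
-- forward stack pass with no reversal; objective: idiomatic.

-- ===== PORT A =====
-- one step of A's loop over reversed(s): state = (result, skip)
def pvAStep (st : List Char × Nat) (c : Char) : List Char × Nat :=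
  if c = '*' then (st.1, st.2 + 1)
  else if st.2 > 0 then (st.1, st.2 - 1)
  else (st.1 ++ [c], st.2)

def removeStars2 (s : String) : String :=
  String.mk ((s.toList.reverse.foldl pvAStep ([], 0)).1.reverse)

-- ===== PORT B =====
-- one step of B's loop: pop on '*' (guarded), push otherwise
def pvBStep (stack : List Char) (c : Char) : List Char :=
  if c = '*' then stack.dropLast else stack ++ [c]

def removeStars2_alt (s : String) : String :=
  String.mk (s.toList.foldl pvBStep [])

-- ===== PRECONDITION & SPEC =====
def Spec_removeStars2 (s : String) (out : String) : Prop := out = removeStars2_alt s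
instance (s : String) (out : String) : Decidable (Spec_removeStars2 s out) := by unfold Spec_removeStars2; infer_instance

-- ===== CLAIM (what is proved, stated in full; the proofs are below) =====
def Claim_equal_removeStars2 : Prop := ∀ (s : String), Dom_removeStars2 s → Spec_removeStars2 s (removeStars2 s)

-- ===== LEMMAS AND PROOFS =====

-- reference recursion: process the list from the right; returns (answer, unmatched stars)
def pvCore : List Char → List Char × Nat
  | [] => ([], 0)
  | c :: t =>
    let p := pvCore t
    if c = '*' then (p.1, p.2 + 1)
    else if p.2 > 0 then (p.1, p.2 - 1)
    else (c :: p.1, p.2)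

theorem pvA_core (l : List Char) :
    l.reverse.foldl pvAStep ([], 0) = ((pvCore l).1.reverse, (pvCore l).2) := by
  rw [List.foldl_reverse]
  induction l with
  | nil => simp [pvCore]
  | cons c t ih =>
    obtain ⟨r, k, hp⟩ : ∃ r k, pvCore t = (r, k) := ⟨_, _, rfl⟩
    have hct : pvCore (c :: t) =
        if c = '*' then (r, k + 1) else if k > 0 then (r, k - 1) else (c :: r, k) := by
      simp [pvCore, hp]
    simp only [hp] at ih
    rw [List.foldr_cons, ih, hct]
    unfold pvAStep
    split_ifs <;> simp

theorem pvB_core (l : List Char) (init : List Char) :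
    l.foldl pvBStep init =
      init.take (init.length - (pvCore l).2) ++ (pvCore l).1 := by
  induction l generalizing init with
  | nil => simp [pvCore]
  | cons c t ih =>
    obtain ⟨r, k, hp⟩ : ∃ r k, pvCore t = (r, k) := ⟨_, _, rfl⟩
    have hct : pvCore (c :: t) =
        if c = '*' then (r, k + 1) else if k > 0 then (r, k - 1) else (c :: r, k) := by
      simp [pvCore, hp]
    simp only [List.foldl_cons, pvBStep, hct]
    by_cases hc : c = '*'
    · simp only [if_pos hc, ih, hp]
      simp only [List.dropLast_eq_take, List.take_take, List.length_take]
      congr 2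
      omega
    · simp only [if_neg hc, ih, hp]
      by_cases hk : k > 0
      · simp only [if_pos hk]
        rw [List.take_append_of_le_length (by simp; omega)]
        congr 2
        simp
        omega
      · have hk0 : k = 0 := by omega
        subst hk0
        simp only [if_neg hk]
        rw [List.take_of_length_le (by simp)]
        simp

-- ===== VERDICT (by name: the statement is the Claim_ definition above) =====
theorem removeStars2_spec : Claim_equal_removeStars2 := by
  intro s _
  unfold Spec_removeStars2 removeStars2 removeStars2_alt
  rw [pvA_core, pvB_core]
  simp
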